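-- pv_equiv track=rewrite | github.com/uvsq22005562/PROJET_CRYPTO_Jules_Marty | texte_N°4/dechiffrement_texte4.py | texte_miroir
-- ===== SOURCE A (Python) =====
-- def texte_miroir(texte):
--     ''' inverse toutes les lignes du texte '''
--     # séparation + inversions des lignes
--     chaine1 = []
--     temp = []
--     for elm in texte:
--         if elm == '\n':
--             temp.reverse()
--             chaine1.append(temp)
--             temp = []
--         else:
--             temp.append(elm)
--     temp.reverse()
--     chaine1.append(temp)
--     # remise au format initial
--     chaine2 = ''
--     for elm in chaine1:
--         for elmm in elm:
--             chaine2 += elmm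
--         chaine2 += '\n'
--     return chaine2
-- ===== SOURCE B (Python) =====
-- def texte_miroir(texte):
--     ''' inverse toutes les lignes du texte '''
--     return ''.join(line[::-1] + '\n' for line in texte.split('\n'))
-- ===== Notes on version B (the rewrite author's own statement) =====
-- stated objective: simpler
-- what changed: Replaces A's character-by-character scan with an explicit buffer, emit-on-newline logic and char-wise string concatenation by a one-liner: split on newlines, reverse each line by slicing, join with a trailing newline each.
import Mathlib
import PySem

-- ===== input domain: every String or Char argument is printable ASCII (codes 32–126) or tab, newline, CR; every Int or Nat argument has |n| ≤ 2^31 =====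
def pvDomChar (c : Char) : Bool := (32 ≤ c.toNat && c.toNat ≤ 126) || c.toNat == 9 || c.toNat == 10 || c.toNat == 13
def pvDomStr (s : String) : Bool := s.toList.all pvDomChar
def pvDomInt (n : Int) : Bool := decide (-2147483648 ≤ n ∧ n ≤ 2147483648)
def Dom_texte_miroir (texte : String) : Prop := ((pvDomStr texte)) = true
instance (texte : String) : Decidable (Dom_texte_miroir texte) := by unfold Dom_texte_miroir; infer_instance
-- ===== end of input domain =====

-- B replaces A's char-by-char scan (buffer + emit-on-newline + char-wise string concatenation)
-- by split-on-newline, per-line reverse via slicing, and a single join (simpler, one-liner).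


-- ===== PORT A =====
-- literal transliteration: one pass over the characters with state (chaine1, temp),
-- then the nested rebuild loop appending character by character (chaine2 += elmm).
def texte_miroir (texte : String) : String :=
  let st := texte.toList.foldl
    (fun (st : List (List Char) × List Char) elm =>
      if elm = '\n' then (st.1 ++ [st.2.reverse], ([] : List Char))
      else (st.1, st.2 ++ [elm]))
    ([], [])
  let chaine1 := st.1 ++ [st.2.reverse]
  String.ofList (chaine1.foldl
    (fun chaine2 elm => (elm.foldl (fun acc elmm => acc ++ [elmm]) chaine2) ++ ['\n']) [])

-- ===== PORT B =====
-- Source B: return ''.join(line[::-1] + '\n' for line in texte.split('\n'))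
-- texte.split('\n') → PySem.Str.split? (some, since "\n" ≠ ""); line[::-1] is exact reversal
-- (PySem.Str.slice?_none_none_neg_one); '+ "\n"' is exact as list append under ofList.
def texte_miroir_alt (texte : String) : String :=
  PySem.Str.join "" (((PySem.Str.split? texte "\n").getD []).map
    (fun line => String.ofList (line.toList.reverse ++ ['\n'])))

-- ===== PRECONDITION & SPEC =====
def Spec_texte_miroir (texte : String) (out : String) : Prop := out = texte_miroir_alt texte
instance (texte : String) (out : String) : Decidable (Spec_texte_miroir texte out) := by unfold Spec_texte_miroir; infer_instance

-- ===== CLAIM (what is proved, stated in full; the proofs are below) =====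
def Claim_equal_texte_miroir : Prop := ∀ (texte : String), Dom_texte_miroir texte → Spec_texte_miroir texte (texte_miroir texte)

-- ===== LEMMAS AND PROOFS =====

/-- Pure single-`'\n'` splitter used to characterise both programs. -/
def splitNL (cur : List Char) : List Char → List (List Char)
  | [] => [cur.reverse]
  | c :: rest => if c = '\n' then cur.reverse :: splitNL [] rest else splitNL (c :: cur) rest

theorem splitOn_go_eq (l : List Char) : ∀ (fuel : Nat) (cur : List Char)
    (acc : List (List Char)), l.length ≤ fuel →
    PySem.Chars.splitOn.go ['\n'] fuel l cur acc = acc.reverse ++ splitNL cur l := by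
  induction l with
  | nil =>
    intro fuel cur acc _
    cases fuel <;> simp [PySem.Chars.splitOn.go, splitNL]
  | cons c rest ih =>
    intro fuel cur acc h
    cases fuel with
    | zero => simp at h
    | succ f =>
      simp only [List.length_cons, Nat.add_le_add_iff_right] at h
      by_cases hc : c = '\n'
      · subst hc
        rw [show PySem.Chars.splitOn.go ['\n'] (f+1) ('\n' :: rest) cur acc
              = PySem.Chars.splitOn.go ['\n'] f rest [] (cur.reverse :: acc) by
            simp [PySem.Chars.splitOn.go, List.isPrefixOf]]
        rw [ih f [] (cur.reverse :: acc) h]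
        simp [splitNL]
      · have hc' : ¬ '\n' = c := fun h => hc h.symm
        rw [show PySem.Chars.splitOn.go ['\n'] (f+1) (c :: rest) cur acc
              = PySem.Chars.splitOn.go ['\n'] f rest (c :: cur) acc by
            simp [PySem.Chars.splitOn.go, List.isPrefixOf, hc']]
        rw [ih f (c :: cur) acc h]
        simp [splitNL, hc]

theorem splitOn_eq_splitNL (s : List Char) :
    PySem.Chars.splitOn s ['\n'] = splitNL [] s := by
  rw [PySem.Chars.splitOn, splitOn_go_eq s (s.length + 1) [] [] (by omega)]
  rfl

/-- A's inner rebuild loop appends the line's characters one by one. -/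
theorem inner_fold (elm : List Char) : ∀ acc : List Char,
    elm.foldl (fun acc elmm => acc ++ [elmm]) acc = acc ++ elm := by
  induction elm with
  | nil => simp
  | cons c rest ih => intro acc; simp [List.foldl_cons, ih]

/-- A's outer rebuild loop flattens the lines, each followed by `'\n'`. -/
theorem outer_fold (l : List (List Char)) : ∀ acc : List Char,
    l.foldl (fun chaine2 elm =>
        (elm.foldl (fun acc elmm => acc ++ [elmm]) chaine2) ++ ['\n']) acc
      = acc ++ (l.map (· ++ ['\n'])).flatten := by
  induction l with
  | nil => simp
  | cons e rest ih =>
    intro acc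
    rw [List.foldl_cons, inner_fold, ih]
    simp

/-- Invariant of A's scanning loop: the emitted lines are the newline-split
    segments, each reversed; A's buffer is the splitter's accumulator, reversed. -/
theorem scan_fold (cs : List Char) : ∀ (temp : List Char) (done : List (List Char)),
    (let st := cs.foldl
        (fun (st : List (List Char) × List Char) elm =>
          if elm = '\n' then (st.1 ++ [st.2.reverse], ([] : List Char))
          else (st.1, st.2 ++ [elm])) (done, temp)
     st.1 ++ [st.2.reverse])
      = done ++ (splitNL temp.reverse cs).map List.reverse := by
  induction cs with
  | nil => intro temp done; simp [splitNL]
  | cons c rest ih =>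
    intro temp done
    by_cases hc : c = '\n'
    · subst hc
      simpa [splitNL] using ih [] (done ++ [temp.reverse])
    · have h1 := ih (temp ++ [c]) done
      simp only [List.reverse_append, List.reverse_cons, List.reverse_nil,
        List.nil_append, List.singleton_append] at h1
      simpa [List.foldl_cons, hc, splitNL] using h1

/-- `''.join` with the empty separator is `flatten`. -/
theorem join_nil_flatten (parts : List (List Char)) :
    PySem.Chars.join [] parts = parts.flatten := by
  induction parts with
  | nil => rfl
  | cons p rest ih =>
    cases rest with
    | nil => simp [PySem.Chars.join, List.intercalate]
    | cons q r =>
      simp only [PySem.Chars.join, List.intercalate] at ih ⊢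
      simp [List.intersperse, ih]

theorem alt_toList (texte : String) :
    (texte_miroir_alt texte).toList
      = ((splitNL [] texte.toList).map (fun l => l.reverse ++ ['\n'])).flatten := by
  unfold texte_miroir_alt
  rw [PySem.Str.toList_join]
  have hsplit : PySem.Str.split? texte "\n"
      = some ((splitNL [] texte.toList).map String.ofList) := by
    rw [PySem.Str.split?]
    have : PySem.Chars.split? texte.toList "\n".toList
        = some (splitNL [] texte.toList) := by
      rw [PySem.Chars.split?]
      simp [show ("\n".toList = ['\n']) from rfl, splitOn_eq_splitNL]
    rw [this]; rfl
  rw [hsplit]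
  simp only [Option.getD_some, List.map_map]
  rw [show ("".toList) = ([] : List Char) from rfl, join_nil_flatten]
  congr 1
  simp [Function.comp]

-- ===== VERDICT (by name: the statement is the Claim_ definition above) =====
theorem texte_miroir_spec : Claim_equal_texte_miroir := by
  intro texte _
  unfold Spec_texte_miroir
  have hb := alt_toList texte
  have ha : (texte_miroir texte).toList
      = ((splitNL [] texte.toList).map (fun l => l.reverse ++ ['\n'])).flatten := by
    unfold texte_miroir
    rw [String.toList_ofList, outer_fold]
    have h := scan_fold texte.toList [] []
    simp only [List.reverse_nil] at h
    rw [show ([] : List (List Char)) ++ (splitNL [] texte.toList).map List.reverse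
          = (splitNL [] texte.toList).map List.reverse from by simp] at h
    simp only [List.nil_append]
    rw [h, List.map_map]
    rfl
  have : (texte_miroir texte).toList = (texte_miroir_alt texte).toList := by rw [ha, hb]
  calc texte_miroir texte = String.ofList (texte_miroir texte).toList := by
        simp
    _ = String.ofList (texte_miroir_alt texte).toList := by rw [this]
    _ = texte_miroir_alt texte := by simp
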